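-- pv_equiv track=rewrite | github.com/knome/kmforth | tools/modules/code_generation.py | asm_stringize
-- ===== SOURCE A (Python) =====
-- def asm_stringize( ss ):
--     bits      = []
--     instr     = False
--     for cc in ss:
--         if cc.lower() in ' abcdefghijklmnopqrstuvwxyz0123456789!@#$%^&*()[]{}|,:-/':
--             if instr:
--                 bits.append( cc )
--                 continue
--             else:
--                 if bits:
--                     bits.append( ',' )
--                 bits.append( "'" )
--                 bits.append( cc )
--                 instr = True
--         else:
--             if instr:
--                 bits.append( "'")
--                 instr = False
--             first = None
--             for bit in cc.encode('utf-8').hex():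
--                 if first == None:
--                     first = bit
--                 else:
--                     if bits:
--                         bits.append( ',' )
--                     bits.append( '0x' + first + bit )
--                     first = None
--     if instr:
--         bits.append( "'" )
--
--     if bits:
--         bits.append(',')
--
--     bits.append( '0' )
--
--     return ''.join( bits )
-- ===== SOURCE B (Python) =====
-- from itertools import groupby
--
--
-- def asm_stringize(ss):
--     def printable(cc):
--         return cc.lower() in ' abcdefghijklmnopqrstuvwxyz0123456789!@#$%^&*()[]{}|,:-/'
--
--     tokens = []
--     for key, grp in groupby(ss, key=printable):
--         if key:
--             tokens.append("'" + ''.join(grp) + "'")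
--         else:
--             for cc in grp:
--                 for b in cc.encode('utf-8'):
--                     tokens.append('0x' + format(b, '02x'))
--     tokens.append('0')
--     return ','.join(tokens)
-- ===== Notes on version B (the rewrite author's own statement) =====
-- stated objective: idiomatic
-- what changed: A's single char-by-char state machine (an 'inside string literal' flag plus per-bit comma bookkeeping and a hex-digit pairing variable) is replaced by an itertools.groupby over maximal printable/non-printable runs, emitting one complete token per printable run and one per encoded byte, comma-joined at the end.
import Mathlib
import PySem

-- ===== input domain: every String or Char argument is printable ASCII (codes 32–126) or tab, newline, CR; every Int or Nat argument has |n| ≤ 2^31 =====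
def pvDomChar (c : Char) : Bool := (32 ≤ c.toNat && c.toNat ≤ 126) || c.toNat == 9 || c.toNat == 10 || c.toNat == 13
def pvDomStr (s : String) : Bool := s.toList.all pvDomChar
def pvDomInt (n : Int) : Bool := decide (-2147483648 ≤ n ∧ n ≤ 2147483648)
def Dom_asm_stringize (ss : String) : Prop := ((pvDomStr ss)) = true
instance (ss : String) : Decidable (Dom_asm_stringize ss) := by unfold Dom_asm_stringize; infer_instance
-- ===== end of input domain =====

-- B replaces A's char-by-char state machine (instr flag + comma bookkeeping) by a
-- groupby into maximal printable/non-printable runs, one token per run / hex byte,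
-- finished with a single ','.join (objective: idiomatic / simpler decomposition).

-- ===== PORT A =====
-- shared with port B: both Pythons use the identical test `cc.lower() in '…'`
def pvAllowed : String := " abcdefghijklmnopqrstuvwxyz0123456789!@#$%^&*()[]{}|,:-/"
def pvPrintable (cc : Char) : Bool := PySem.Str.isIn (PySem.Str.lower (String.ofList [cc])) pvAllowed
-- lowercase hex digit, as Python's bytes.hex()/format(b,'02x') produce
def pvHexDigit (n : Nat) : Char := if n < 10 then Char.ofNat (48 + n) else Char.ofNat (87 + n)
-- cc.encode('utf-8') as a byte list (exact for all non-surrogate code points; Dom is ASCII)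
def pvUtf8 (cc : Char) : List Nat :=
  if cc.toNat < 128 then [cc.toNat]
  else if cc.toNat < 2048 then [192 + cc.toNat / 64, 128 + cc.toNat % 64]
  else if cc.toNat < 65536 then [224 + cc.toNat / 4096, 128 + (cc.toNat / 64) % 64, 128 + cc.toNat % 64]
  else [240 + cc.toNat / 262144, 128 + (cc.toNat / 4096) % 64, 128 + (cc.toNat / 64) % 64, 128 + cc.toNat % 64]
-- cc.encode('utf-8').hex(): the hex digits of every byte, in order
def pvHexChars (cc : Char) : List Char :=
  (pvUtf8 cc).flatMap (fun b => [pvHexDigit (b / 16), pvHexDigit (b % 16)])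
-- A's inner `for bit in …hex():` loop with its `first` pairing state
def pvHexLoop : List Char → List String → Option Char → List String × Option Char
  | [], bits, first => (bits, first)
  | bit :: rest, bits, none => pvHexLoop rest bits (some bit)
  | bit :: rest, bits, some f =>
      pvHexLoop rest ((if bits.isEmpty then bits else bits ++ [","]) ++ [String.ofList ['0', 'x', f, bit]]) none
-- A's main `for cc in ss:` loop over state (bits, instr)
def pvLoopA : List Char → List String → Bool → List String × Bool
  | [], bits, instr => (bits, instr)
  | cc :: rest, bits, instr =>
    if pvPrintable cc then
      if instr then
        pvLoopA rest (bits ++ [String.ofList [cc]]) true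
      else
        pvLoopA rest ((if bits.isEmpty then bits else bits ++ [","]) ++ ["'", String.ofList [cc]]) true
    else
      let bits1 := if instr then bits ++ ["'"] else bits
      pvLoopA rest (pvHexLoop (pvHexChars cc) bits1 none).1 false

def asm_stringize (ss : String) : String :=
  let r := pvLoopA ss.toList [] false
  let bits := if r.2 then r.1 ++ ["'"] else r.1
  let bits := if bits.isEmpty then bits else bits ++ [","]
  PySem.Str.join "" (bits ++ ["0"])

-- ===== PORT B =====
-- '0x' + format(b, '02x')
def pvHexTok (b : Nat) : String := String.ofList ['0', 'x', pvHexDigit (b / 16), pvHexDigit (b % 16)]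
-- itertools.groupby(ss, key=printable): one pass over maximal runs of equal key
def pvGroups : List Char → List String
  | [] => []
  | c :: cs =>
    -- the maximal run with the same key as c is c :: cs.takeWhile …; the rest restarts groupby
    (if pvPrintable c then
      [String.ofList ('\'' :: (c :: cs.takeWhile (fun x => pvPrintable x == pvPrintable c)) ++ ['\''])]  -- "'" + ''.join(grp) + "'"
     else (c :: cs.takeWhile (fun x => pvPrintable x == pvPrintable c)).flatMap
        (fun cc => (pvUtf8 cc).map pvHexTok))
      ++ pvGroups (cs.dropWhile (fun x => pvPrintable x == pvPrintable c))
termination_by cs => cs.length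
decreasing_by simp; exact List.length_dropWhile_le _ _

def asm_stringize_alt (ss : String) : String :=
  PySem.Str.join "," (pvGroups ss.toList ++ ["0"])

-- ===== PRECONDITION & SPEC =====
def Spec_asm_stringize (ss : String) (out : String) : Prop := out = asm_stringize_alt ss
instance (ss : String) (out : String) : Decidable (Spec_asm_stringize ss out) := by unfold Spec_asm_stringize; infer_instance

-- ===== CLAIM (what is proved, stated in full; the proofs are below) =====
def Claim_equal_asm_stringize : Prop := ∀ (ss : String), Dom_asm_stringize ss → Spec_asm_stringize ss (asm_stringize ss)

-- ===== LEMMAS AND PROOFS =====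

-- concatenation of a bit list, and the comma-glued rendering of a token list
def pvCstr (xs : List String) : List Char := xs.flatMap String.toList
def pvGl (ts : List String) : List Char := ts.flatMap (fun t => ',' :: t.toList)
-- pvGlue e ts: ts comma-separated, with a LEADING comma unless e (= "bits was empty")
def pvGlue (e : Bool) (ts : List String) : List Char := if e then (pvGl ts).tail else pvGl ts
-- A's token-emission step: comma if bits nonempty, then the token
def pvEmit (b : List String) (t : String) : List String := (if b.isEmpty then b else b ++ [","]) ++ [t]
def pvSgl (c : Char) : String := String.ofList [c]
def pvToks (cc : Char) : List String := (pvUtf8 cc).map pvHexTok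

theorem pvGlue_append (e : Bool) (l1 l2 : List String) (h : l1 ≠ []) :
    pvGlue e (l1 ++ l2) = pvGlue e l1 ++ pvGl l2 := by
  cases l1 with
  | nil => exact absurd rfl h
  | cons t l1' => cases e <;> simp [pvGlue, pvGl]

theorem pvEmit_ne_nil (b : List String) (t : String) : pvEmit b t ≠ [] := by
  simp [pvEmit]

theorem pvFoldl_emit_nil_iff (ts : List String) : ∀ b, (ts.foldl pvEmit b = []) ↔ (b = [] ∧ ts = []) := by
  induction ts with
  | nil => intro b; simp
  | cons t ts ih =>
    intro b
    rw [List.foldl_cons, ih]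
    simp [pvEmit_ne_nil]

theorem pvCstr_append (l1 l2 : List String) : pvCstr (l1 ++ l2) = pvCstr l1 ++ pvCstr l2 := by
  simp [pvCstr]

theorem pvCstr_foldl_emit (ts : List String) : ∀ b, pvCstr (ts.foldl pvEmit b) = pvCstr b ++ pvGlue b.isEmpty ts := by
  induction ts with
  | nil => intro b; cases b <;> simp [pvCstr, pvGlue, pvGl]
  | cons t ts ih =>
    intro b
    rw [List.foldl_cons, ih]
    by_cases hb : b = []
    · subst hb; simp [pvEmit, pvCstr, pvGlue, pvGl]
    · simp [pvEmit, pvCstr, pvGlue, pvGl, hb, List.isEmpty_iff]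

theorem pvHexLoop_pairs (bs : List Nat) : ∀ b,
    pvHexLoop (bs.flatMap (fun x => [pvHexDigit (x / 16), pvHexDigit (x % 16)])) b none =
      ((bs.map pvHexTok).foldl pvEmit b, none) := by
  induction bs with
  | nil => intro b; rfl
  | cons x bs ih =>
    intro b
    simp only [List.flatMap_cons, List.cons_append, List.map_cons, List.foldl_cons]
    show pvHexLoop _ _ _ = _
    rw [pvHexLoop, pvHexLoop]
    exact ih _

theorem pvHexChars_eq (cc : Char) :
    pvHexChars cc = (pvUtf8 cc).flatMap (fun x => [pvHexDigit (x / 16), pvHexDigit (x % 16)]) := rfl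

theorem pvLoopA_printRun (run : List Char) : ∀ (rest : List Char) (b : List String),
    (∀ x ∈ run, pvPrintable x = true) →
    pvLoopA (run ++ rest) b true = pvLoopA rest (b ++ run.map pvSgl) true := by
  induction run with
  | nil => intro rest b _; simp
  | cons c run ih =>
    intro rest b h
    have hc : pvPrintable c = true := h c (List.mem_cons_self)
    simp only [List.cons_append, pvLoopA, hc, if_true]
    rw [ih rest _ (fun x hx => h x (List.mem_cons_of_mem _ hx))]
    simp [pvSgl]

theorem pvLoopA_hexRun (run : List Char) : ∀ (rest : List Char) (b : List String),
    (∀ x ∈ run, pvPrintable x = false) →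
    pvLoopA (run ++ rest) b false = pvLoopA rest ((run.flatMap pvToks).foldl pvEmit b) false := by
  induction run with
  | nil => intro rest b _; simp
  | cons c run ih =>
    intro rest b h
    have hc : pvPrintable c = false := h c (List.mem_cons_self)
    simp only [List.cons_append, pvLoopA, hc, if_false, Bool.false_eq_true]
    rw [pvHexChars_eq, pvHexLoop_pairs]
    rw [ih rest _ (fun x hx => h x (List.mem_cons_of_mem _ hx))]
    simp [pvToks]

theorem pvLoopA_close (d : Char) (r : List Char) (b : List String) (hd : pvPrintable d = false) :
    pvLoopA (d :: r) b true = pvLoopA (d :: r) (b ++ ["'"]) false := by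
  simp [pvLoopA, hd]

theorem pvUtf8_ne_nil (c : Char) : pvUtf8 c ≠ [] := by
  unfold pvUtf8; split_ifs <;> simp

theorem pvToks_ne_nil (c : Char) : pvToks c ≠ [] := by
  simp [pvToks, pvUtf8_ne_nil]

theorem pvDropWhile_head_false (p : Char → Bool) (l : List Char) (d : Char) (r : List Char)
    (h : l.dropWhile p = d :: r) : p d = false := by
  have := List.head_dropWhile_not p (l := l) (by simp [h])
  simp only [h, List.head_cons] at this
  exact this

theorem pvCstr_map_sgl (l : List Char) : List.flatMap String.toList (List.map pvSgl l) = l := by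
  simp [pvSgl, List.flatMap_map]

theorem pvKey (n : Nat) : ∀ (cs : List Char) (b : List String), cs.length ≤ n →
    pvCstr ((pvLoopA cs b false).1 ++ (if (pvLoopA cs b false).2 then ["'"] else [])) =
      pvCstr b ++ pvGlue b.isEmpty (pvGroups cs) ∧
    (((pvLoopA cs b false).1 ++ (if (pvLoopA cs b false).2 then ["'"] else [])) = [] ↔ (b = [] ∧ cs = [])) := by
  induction n with
  | zero =>
    intro cs b h
    have hcs : cs = [] := List.eq_nil_of_length_eq_zero (Nat.le_zero.mp h)
    subst hcs
    simp [pvLoopA, pvGroups, pvGlue, pvGl]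
  | succ n ih =>
    intro cs b hlen
    cases cs with
    | nil => simp [pvLoopA, pvGroups, pvGlue, pvGl]
    | cons c cs' =>
      have hlen' : cs'.length ≤ n := Nat.lt_succ_iff.mp (by simpa using hlen)
      have hsplit : cs'.takeWhile (fun x => pvPrintable x == pvPrintable c) ++
          cs'.dropWhile (fun x => pvPrintable x == pvPrintable c) = cs' :=
        List.takeWhile_append_dropWhile
      have hlenrest : (cs'.dropWhile (fun x => pvPrintable x == pvPrintable c)).length ≤ n :=
        Nat.le_trans (List.length_dropWhile_le _ _) hlen'
      cases hp : pvPrintable c with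
      | true =>
        have hrun : ∀ x ∈ cs'.takeWhile (fun x => pvPrintable x == pvPrintable c), pvPrintable x = true := by
          intro x hx
          have := List.mem_takeWhile_imp hx
          simpa [hp] using this
        set run := cs'.takeWhile (fun x => pvPrintable x == pvPrintable c) with hrundef
        set B2 := ((if b.isEmpty then b else b ++ [","]) ++ ["'", pvSgl c]) ++ run.map pvSgl with hB2
        have hloop : pvLoopA (c :: cs') b false =
            pvLoopA (cs'.dropWhile (fun x => pvPrintable x == pvPrintable c)) B2 true := by
          have step1 : pvLoopA (c :: cs') b false =
              pvLoopA cs' ((if b.isEmpty then b else b ++ [","]) ++ ["'", pvSgl c]) true := by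
            simp [pvLoopA, hp, pvSgl]
          rw [step1]
          conv_lhs => rw [← hsplit]
          exact pvLoopA_printRun _ _ _ hrun
        have hgroups : pvGroups (c :: cs') =
            [String.ofList ('\'' :: (c :: run) ++ ['\''])] ++
              pvGroups (cs'.dropWhile (fun x => pvPrintable x == pvPrintable c)) := by
          rw [pvGroups, if_pos hp]
        rw [hloop, hgroups]
        cases hrest : cs'.dropWhile (fun x => pvPrintable x == pvPrintable c) with
        | nil =>
          constructor
          · rw [pvGroups]
            by_cases hb : b = []
            · subst hb; simp [pvLoopA, pvCstr, pvGlue, pvGl, pvSgl, hB2, pvCstr_map_sgl]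
            · simp [pvLoopA, pvCstr, pvGlue, pvGl, pvSgl, hB2, hb, List.isEmpty_iff, pvCstr_map_sgl]
          · simp [pvLoopA, hB2]
        | cons d r' =>
          have hd : pvPrintable d = false := by
            have := pvDropWhile_head_false _ _ _ _ hrest
            simpa [hp] using this
          rw [pvLoopA_close d r' B2 hd]
          rw [hrest] at hlenrest
          obtain ⟨ih1, ih2⟩ := ih (d :: r') (B2 ++ ["'"]) hlenrest
          constructor
          · rw [ih1]
            have hBe : (B2 ++ ["'"]).isEmpty = false := by simp [hB2]
            rw [hBe]
            by_cases hb : b = []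
            · subst hb; simp [pvCstr, pvGlue, pvGl, pvSgl, hB2, pvCstr_map_sgl]
            · simp [pvCstr, pvGlue, pvGl, pvSgl, hB2, hb, List.isEmpty_iff, pvCstr_map_sgl]
          · rw [ih2]; simp [hB2]
      | false =>
        have hrun : ∀ x ∈ c :: cs'.takeWhile (fun x => pvPrintable x == pvPrintable c), pvPrintable x = false := by
          intro x hx
          rcases List.mem_cons.mp hx with h1 | h2
          · subst h1; exact hp
          · have := List.mem_takeWhile_imp h2
            simpa [hp] using this
        set run := cs'.takeWhile (fun x => pvPrintable x == pvPrintable c) with hrundef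
        set toks := (c :: run).flatMap pvToks with htoksdef
        have htoksne : toks ≠ [] := by
          rw [htoksdef]
          simp [pvToks_ne_nil]
        set B3 := toks.foldl pvEmit b with hB3
        have hB3ne : B3 ≠ [] := by
          rw [hB3]
          intro h
          exact htoksne ((pvFoldl_emit_nil_iff toks b).mp h).2
        have hloop : pvLoopA (c :: cs') b false =
            pvLoopA (cs'.dropWhile (fun x => pvPrintable x == pvPrintable c)) B3 false := by
          have hcons : c :: cs' = (c :: run) ++
              cs'.dropWhile (fun x => pvPrintable x == pvPrintable c) := by
            rw [hrundef, List.cons_append, List.takeWhile_append_dropWhile]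
          rw [hcons, pvLoopA_hexRun _ _ _ hrun, ← htoksdef, ← hB3]
        have hgroups : pvGroups (c :: cs') = toks ++
            pvGroups (cs'.dropWhile (fun x => pvPrintable x == pvPrintable c)) := by
          rw [pvGroups, if_neg (by simp [hp])]
          rw [htoksdef, hrundef]
          rfl
        rw [hloop, hgroups]
        cases hrest : cs'.dropWhile (fun x => pvPrintable x == pvPrintable c) with
        | nil =>
          constructor
          · rw [pvGroups]
            simp only [pvLoopA, List.append_nil]
            rw [hB3]
            simp [pvCstr_foldl_emit]
          · simp [pvLoopA, hB3ne]
        | cons d r' =>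
          rw [hrest] at hlenrest
          obtain ⟨ih1, ih2⟩ := ih (d :: r') B3 hlenrest
          constructor
          · rw [ih1, pvGlue_append _ _ _ htoksne]
            have hBe : B3.isEmpty = false := by simp [hB3ne]
            rw [hBe, hB3, pvCstr_foldl_emit]
            simp [pvGlue]
          · rw [ih2]; simp [hB3ne]

theorem pvStrExt (s t : String) (h : s.toList = t.toList) : s = t := by
  have := congrArg String.ofList h
  simpa using this

theorem pvJoin_empty_toList (xs : List String) : (PySem.Str.join "" xs).toList = pvCstr xs := by
  simp only [PySem.Str.toList_join]
  have hsep : "".toList = ([] : List Char) := rfl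
  rw [hsep]
  induction xs with
  | nil => simp [PySem.Chars.join, pvCstr, List.intercalate]
  | cons t xs ih =>
    cases xs with
    | nil => simp [PySem.Chars.join, pvCstr, List.intercalate]
    | cons u xs' =>
      simp only [List.map_cons] at ih ⊢
      rw [PySem.Chars.join_cons_cons, ih]
      simp [pvCstr]

theorem pvJoinComma_aux (lss : List (List Char)) : ∀ a : List Char,
    PySem.Chars.join [','] (a :: lss) = a ++ lss.flatMap (fun l => ',' :: l) := by
  induction lss with
  | nil => intro a; simp [PySem.Chars.join, List.intercalate]
  | cons b lss ih =>
    intro a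
    rw [PySem.Chars.join_cons_cons, ih b]
    simp

theorem pvJoinComma (ts : List String) :
    PySem.Chars.join [','] (List.map String.toList ts ++ [['0']]) =
      pvGlue true ts ++ (if ts.isEmpty then [] else [',']) ++ ['0'] := by
  cases ts with
  | nil => simp [pvGlue, pvGl]
  | cons t ts =>
    rw [List.map_cons, List.cons_append, pvJoinComma_aux]
    simp [pvGlue, pvGl, List.flatMap_map]

theorem pvGroups_ne_nil (c : Char) (cs : List Char) : pvGroups (c :: cs) ≠ [] := by
  rw [pvGroups]
  cases hp : pvPrintable c <;> simp [pvUtf8_ne_nil]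

-- ===== VERDICT (by name: the statement is the Claim_ definition above) =====
theorem asm_stringize_spec : Claim_equal_asm_stringize := by
  intro ss _
  unfold Spec_asm_stringize asm_stringize asm_stringize_alt
  obtain ⟨h1, h2⟩ := pvKey ss.toList.length ss.toList [] (Nat.le_refl _)
  have hF : (if (pvLoopA ss.toList [] false).2 then (pvLoopA ss.toList [] false).1 ++ ["'"] else (pvLoopA ss.toList [] false).1) =
      (pvLoopA ss.toList [] false).1 ++ (if (pvLoopA ss.toList [] false).2 then ["'"] else []) := by
    cases (pvLoopA ss.toList [] false).2 <;> simp
  apply pvStrExt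
  rw [pvJoin_empty_toList]
  simp only [PySem.Str.toList_join, List.map_append]
  have h0 : List.map String.toList ["0"] = [['0']] := by rfl
  have hsep2 : ",".toList = [','] := rfl
  rw [h0, hsep2, pvJoinComma]
  rw [hF]
  set F := (pvLoopA ss.toList [] false).1 ++ (if (pvLoopA ss.toList [] false).2 then ["'"] else []) with hFdef
  have hcstr : pvCstr F = pvGlue true (pvGroups ss.toList) := by
    rw [h1]; simp [pvCstr]
  cases hcs : ss.toList with
  | nil =>
    have hFnil : F = [] := by rw [h2]; simp [hcs]
    rw [hFnil]
    simp [pvCstr, pvGlue, pvGl, pvGroups]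
  | cons c cs' =>
    have hFne : F ≠ [] := by
      rw [Ne, h2]; simp [hcs]
    have hFe : F.isEmpty = false := by simp [hFne]
    have hTe : (pvGroups ss.toList).isEmpty = false := by
      simp [hcs, pvGroups_ne_nil]
    rw [hFe, ← hcs]
    rw [hTe]
    simp only [Bool.false_eq_true, if_false]
    simp only [pvCstr_append]
    rw [hcstr]
    simp [pvCstr]
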